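-- pv_equiv track=rewrite | github.com/jase156/IA | Algoritmos_geneticos/bolas.py | valoresSuma
-- ===== SOURCE A (Python) =====
-- def valoresSuma(vectorM, vectorS):
--     sobra = 1
--     for i in range(0,5):
--         resp = sobra in vectorM
--         while resp == True:
--             sobra+=1
--             resp = sobra in vectorM
--         vectorS[i]=sobra
--         sobra+=1
--     return vectorS
-- ===== SOURCE B (Python) =====
-- def valoresSuma(vectorM, vectorS):
--     vals = sorted(set(v for v in vectorM if v > 0))
--     res = []
--     expected = 1
--     for v in vals:
--         if len(res) >= 5:
--             break
--         res += range(expected, min(v, expected + 5 - len(res)))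
--         expected = v + 1
--     res += range(expected, expected + 5 - len(res))
--     for i in range(5):
--         vectorS[i] = res[i]
--     return vectorS
-- ===== Notes on version B (the rewrite author's own statement) =====
-- stated objective: alternative
-- what changed: A scans candidate integers 1,2,3,... upward with an unbounded inner while membership loop per slot; B sorts the distinct positive members of vectorM and walks that sorted list once, emitting the gaps between consecutive present values (capped at 5) and padding after the last one, with no candidate scan or membership test at all.
import Mathlib
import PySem

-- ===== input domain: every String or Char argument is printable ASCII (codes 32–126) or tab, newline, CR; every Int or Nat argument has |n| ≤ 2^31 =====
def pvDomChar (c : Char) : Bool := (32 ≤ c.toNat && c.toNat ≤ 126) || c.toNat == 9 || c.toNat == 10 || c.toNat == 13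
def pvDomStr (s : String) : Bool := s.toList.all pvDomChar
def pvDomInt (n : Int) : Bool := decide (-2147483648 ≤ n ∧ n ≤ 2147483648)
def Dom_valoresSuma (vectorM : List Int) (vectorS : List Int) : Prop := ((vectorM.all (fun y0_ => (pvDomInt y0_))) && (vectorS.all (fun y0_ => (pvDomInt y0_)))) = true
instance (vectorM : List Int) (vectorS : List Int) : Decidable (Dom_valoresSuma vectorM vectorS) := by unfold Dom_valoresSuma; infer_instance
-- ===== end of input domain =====

-- B replaces A's per-slot unbounded upward membership scan with a single gap walk over the sorted
-- distinct positive members of vectorM (objective: alternative). Both A and B mutate vectorS in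
-- place in Python; the equivalence proved here is about the returned list.

-- ===== PORT A =====
-- monotonicity of the termination measure (used by pvFiltLt below)
theorem pvFiltMono (m : List Int) (s : Int) :
    (m.filter (fun x => decide (s + 1 ≤ x))).length ≤ (m.filter (fun x => decide (s ≤ x))).length := by
  simpa [← List.countP_eq_length_filter] using
    List.countP_mono_left (l := m) (p := fun x => decide (s + 1 ≤ x)) (q := fun x => decide (s ≤ x))
      (fun x _ hx => by simp at hx ⊢; omega)

-- termination measure for the inner 'while sobra in vectorM': the number of members ≥ sobra strictly drops
theorem pvFiltLt (m : List Int) (s : Int) (hs : s ∈ m) :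
    (m.filter (fun x => decide (s + 1 ≤ x))).length < (m.filter (fun x => decide (s ≤ x))).length := by
  induction m with
  | nil => cases hs
  | cons a t ih =>
    rw [List.filter_cons, List.filter_cons]
    by_cases hat : s = a
    · subst hat
      have h1 : (decide (s + 1 ≤ s)) = false := by simp
      have h2 : (decide (s ≤ s)) = true := by simp
      rw [h1, h2]
      simpa using Nat.lt_succ_of_le (pvFiltMono t s)
    · have hst : s ∈ t := (List.mem_cons.mp hs).resolve_left hat
      have ht := ih hst
      split_ifs with h1 h2 <;> simp_all <;> omega

-- the inner while loop: first integer ≥ s not in m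
def findFree (m : List Int) (s : Int) : Int :=
  if s ∈ m then findFree m (s + 1) else s
termination_by (m.filter (fun x => decide (s ≤ x))).length
decreasing_by exact pvFiltLt m s (by assumption)

def valoresSuma (vectorM : List Int) (vectorS : List Int) : List Int :=
  ((PySem.List.pyRange 0 5 1).foldl
    (fun (st : Int × List Int) i =>
      let sobra := findFree vectorM st.1
      (sobra + 1, PySem.List.pySetD st.2 i sobra))
    (1, vectorS)).2

-- ===== PORT B =====
def valoresSuma_alt (vectorM : List Int) (vectorS : List Int) : List Int :=
  let vals := PySem.List.sorted (PySem.Set.ofList (vectorM.filter (fun v => decide (0 < v)))) (fun x => x)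
  let st := vals.foldl
      (fun (st : List Int × Int) v =>
        if 5 ≤ st.1.length then st
        else (st.1 ++ PySem.List.pyRange st.2 (min v (st.2 + 5 - (st.1.length : Int))) 1, v + 1))
      ([], 1)
  let res := st.1 ++ PySem.List.pyRange st.2 (st.2 + 5 - (st.1.length : Int)) 1
  (PySem.List.pyRange 0 5 1).foldl
    (fun vs i => PySem.List.pySetD vs i (PySem.List.pyGetD res i 0)) vectorS

-- ===== PRECONDITION & SPEC =====
-- Pre_ excludes lists vectorS of fewer than 5 elements, on which the Python A raises IndexError.
def Pre_valoresSuma (vectorM : List Int) (vectorS : List Int) : Prop := 5 ≤ vectorS.length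
instance (vectorM : List Int) (vectorS : List Int) : Decidable (Pre_valoresSuma vectorM vectorS) := by unfold Pre_valoresSuma; infer_instance
def pvWitness_valoresSuma : List Int × List Int := ([2, 2, 4], [0, 0, 0, 0, 0])

def Spec_valoresSuma (vectorM : List Int) (vectorS : List Int) (out : List Int) : Prop := out = valoresSuma_alt vectorM vectorS
instance (vectorM : List Int) (vectorS : List Int) (out : List Int) : Decidable (Spec_valoresSuma vectorM vectorS out) := by unfold Spec_valoresSuma; infer_instance

-- ===== CLAIM (what is proved, stated in full; the proofs are below) =====
def Claim_equal_valoresSuma : Prop := ∀ (vectorM : List Int) (vectorS : List Int), Dom_valoresSuma vectorM vectorS → Pre_valoresSuma vectorM vectorS → Spec_valoresSuma vectorM vectorS (valoresSuma vectorM vectorS)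

-- ===== LEMMAS AND PROOFS =====

theorem le_findFree (m : List Int) (s : Int) : s ≤ findFree m s := by
  rw [findFree]
  split_ifs with h
  · have := le_findFree m (s + 1)
    omega
  · omega
termination_by (m.filter (fun x => decide (s ≤ x))).length
decreasing_by exact pvFiltLt m s h

theorem findFree_not_mem (m : List Int) (s : Int) : findFree m s ∉ m := by
  rw [findFree]
  split_ifs with h
  · exact findFree_not_mem m (s + 1)
  · exact h
termination_by (m.filter (fun x => decide (s ≤ x))).length
decreasing_by exact pvFiltLt m s h

-- peeling the missing-number list: the filtered range starts with the next free number
theorem stepFilter (m : List Int) (s N : Int) (hN : findFree m s < N) :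
    (PySem.List.pyRange s N 1).filter (fun n => !decide (n ∈ m)) =
      findFree m s :: (PySem.List.pyRange (findFree m s + 1) N 1).filter (fun n => !decide (n ∈ m)) := by
  have hsN : s < N := lt_of_le_of_lt (le_findFree m s) hN
  by_cases hmem : s ∈ m
  · rw [PySem.List.pyRange_one_cons hsN, List.filter_cons]
    have hc : (!decide (s ∈ m)) = false := by simp [hmem]
    rw [hc]
    rw [findFree, if_pos hmem] at hN ⊢
    simpa using stepFilter m (s + 1) N hN
  · rw [PySem.List.pyRange_one_cons hsN, List.filter_cons]
    have hc : (!decide (s ∈ m)) = true := by simp [hmem]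
    rw [hc]
    rw [findFree, if_neg hmem]
    simp
termination_by (m.filter (fun x => decide (s ≤ x))).length
decreasing_by exact pvFiltLt m s hmem

-- a range with no members of m filters to itself
theorem filterRangeFree (m : List Int) (a b : Int)
    (h : ∀ x, a ≤ x → x < b → x ∉ m) :
    (PySem.List.pyRange a b 1).filter (fun n => !decide (n ∈ m)) = PySem.List.pyRange a b 1 := by
  apply List.filter_eq_self.mpr
  intro x hx
  have := (PySem.List.mem_pyRange_one).mp hx
  simp [h x this.1 this.2]

-- shorthand for the missing-number list below e
def missBelow (m : List Int) (e : Int) : List Int :=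
  (PySem.List.pyRange 1 e 1).filter (fun n => !decide (n ∈ m))

-- prefix property: missBelow at a smaller bound is a take of missBelow at a larger bound
theorem missBelow_prefix (m : List Int) (e f : Int) (h1 : 1 ≤ e) (h2 : e ≤ f) :
    missBelow m f = missBelow m e ++
      (PySem.List.pyRange e f 1).filter (fun n => !decide (n ∈ m)) := by
  unfold missBelow
  rw [PySem.List.pyRange_one_append 1 e f h1 h2, List.filter_append]

-- invariant of B's gap fold
theorem foldBInv (m : List Int) (rest : List Int) (res : List Int) (e : Int)
    (hsorted : rest.Pairwise (· < ·))
    (hmem : ∀ v ∈ rest, v ∈ m ∧ e ≤ v)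
    (h1e : 1 ≤ e)
    (hlen : res.length ≤ 5)
    (hE : ∃ E, 1 ≤ E ∧ res = missBelow m E ∧
      (res.length < 5 → E = e ∧ ∀ x ∈ m, 0 < x → e ≤ x → x ∈ rest)) :
    (rest.foldl
      (fun (st : List Int × Int) v =>
        if 5 ≤ st.1.length then st
        else (st.1 ++ PySem.List.pyRange st.2 (min v (st.2 + 5 - (st.1.length : Int))) 1, v + 1))
      (res, e)).1.length ≤ 5 ∧
    1 ≤ (rest.foldl
      (fun (st : List Int × Int) v =>
        if 5 ≤ st.1.length then st
        else (st.1 ++ PySem.List.pyRange st.2 (min v (st.2 + 5 - (st.1.length : Int))) 1, v + 1))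
      (res, e)).2 ∧
      ∃ E, 1 ≤ E ∧ (rest.foldl
      (fun (st : List Int × Int) v =>
        if 5 ≤ st.1.length then st
        else (st.1 ++ PySem.List.pyRange st.2 (min v (st.2 + 5 - (st.1.length : Int))) 1, v + 1))
      (res, e)).1 = missBelow m E ∧
        ((rest.foldl
      (fun (st : List Int × Int) v =>
        if 5 ≤ st.1.length then st
        else (st.1 ++ PySem.List.pyRange st.2 (min v (st.2 + 5 - (st.1.length : Int))) 1, v + 1))
      (res, e)).1.length < 5 → E = (rest.foldl
      (fun (st : List Int × Int) v =>
        if 5 ≤ st.1.length then st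
        else (st.1 ++ PySem.List.pyRange st.2 (min v (st.2 + 5 - (st.1.length : Int))) 1, v + 1))
      (res, e)).2 ∧ ∀ x ∈ m, 0 < x → (rest.foldl
      (fun (st : List Int × Int) v =>
        if 5 ≤ st.1.length then st
        else (st.1 ++ PySem.List.pyRange st.2 (min v (st.2 + 5 - (st.1.length : Int))) 1, v + 1))
      (res, e)).2 ≤ x → False) := by
  induction rest generalizing res e with
  | nil =>
    obtain ⟨E, hE1, hEq, hlt⟩ := hE
    exact ⟨hlen, h1e, E, hE1, hEq, fun h => ⟨(hlt h).1, fun x hx h0 hex => by simpa using (hlt h).2 x hx h0 hex⟩⟩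
  | cons v rest ih =>
    obtain ⟨E, hE1, hEq, hlt⟩ := hE
    simp only [List.foldl_cons]
    by_cases hg : 5 ≤ res.length
    · -- guard: state unchanged, res already full; tail fold also no-ops
      rw [if_pos hg]
      have hlen5 : res.length = 5 := le_antisymm hlen hg
      apply ih res e (List.Pairwise.of_cons hsorted)
        (fun w hw => ⟨(hmem w (List.mem_cons_of_mem v hw)).1, (hmem w (List.mem_cons_of_mem v hw)).2⟩)
        h1e hlen
      exact ⟨E, hE1, hEq, fun h => absurd hlen5 (by omega)⟩
    · rw [if_neg hg]
      have hlen5 : res.length < 5 := by omega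
      obtain ⟨hEe, hall⟩ := hlt hlen5
      subst hEe
      have hvm : v ∈ m := (hmem v (List.mem_cons_self)).1
      have hev : E ≤ v := (hmem v (List.mem_cons_self)).2
      have hrest_ge : ∀ w ∈ rest, v < w := by
        intro w hw
        exact (List.pairwise_cons.mp hsorted).1 w hw
      -- the half-open interval [E, min v K) contains no member of m
      have hfree : ∀ x, E ≤ x → x < min v (E + 5 - (res.length : Int)) → x ∉ m := by
        intro x hx1 hx2 hxm
        have hxv : x < v := lt_of_lt_of_le hx2 (min_le_left _ _)
        by_cases h0 : 0 < x
        · have := hall x hxm h0 hx1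
          rcases List.mem_cons.mp this with h | h
          · omega
          · have := hrest_ge x h; omega
        · omega
      set K := min v (E + 5 - (res.length : Int)) with hK
      have hEK : E ≤ K := by
        have : E ≤ E + 5 - (res.length : Int) := by omega
        exact le_min hev this
      have happ : res ++ PySem.List.pyRange E K 1 = missBelow m K := by
        rw [hEq, missBelow_prefix m E K hE1 hEK, filterRangeFree m E K hfree]
      have hlen' : (res ++ PySem.List.pyRange E K 1).length ≤ 5 := by
        rw [List.length_append, PySem.List.length_pyRange_one]
        have : (K - E).toNat ≤ (5 - (res.length : Int)).toNat := by
          have : K ≤ E + 5 - (res.length : Int) := min_le_right _ _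
          omega
        omega
      apply ih (res ++ PySem.List.pyRange E K 1) (v + 1) (List.Pairwise.of_cons hsorted)
        (fun w hw => ⟨(hmem w (List.mem_cons_of_mem v hw)).1, by have := hrest_ge w hw; omega⟩)
        (by omega) hlen'
      by_cases hcase : K = v
      · -- reached the next present value v: new bound is v + 1 (v itself is filtered out)
        refine ⟨v + 1, by omega, ?_, ?_⟩
        · rw [happ, hcase, missBelow_prefix m v (v + 1) (by omega) (by omega),
            PySem.List.pyRange_one_singleton]
          simp [hvm]
        · intro h
          refine ⟨rfl, fun x hx h0 hex => ?_⟩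
          have := hall x hx h0 (by omega)
          rcases List.mem_cons.mp this with h' | h'
          · omega
          · exact h'
      · -- truncated at 5 elements: res is now full
        have hKv : K < v := lt_of_le_of_ne (min_le_left _ _) hcase
        have hK5 : K = E + 5 - (res.length : Int) := by
          have := min_le_right v (E + 5 - (res.length : Int)); omega
        have hfull : (res ++ PySem.List.pyRange E K 1).length = 5 := by
          rw [List.length_append, PySem.List.length_pyRange_one]
          omega
        exact ⟨K, by omega, happ, fun h => absurd hfull (by omega)⟩

-- any length-5 missBelow list equals A's five findFree values
theorem missBelow_eq_chain (m : List Int) (F : Int) (h1 : 1 ≤ F)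
    (L : List Int) (hL : L = missBelow m F) (hlen : L.length = 5) :
    L = [findFree m 1, findFree m (findFree m 1 + 1),
         findFree m (findFree m (findFree m 1 + 1) + 1),
         findFree m (findFree m (findFree m (findFree m 1 + 1) + 1) + 1),
         findFree m (findFree m (findFree m (findFree m (findFree m 1 + 1) + 1) + 1) + 1)] := by
  set a1 := findFree m 1 with ha1
  set a2 := findFree m (a1 + 1) with ha2
  set a3 := findFree m (a2 + 1) with ha3
  set a4 := findFree m (a3 + 1) with ha4
  set a5 := findFree m (a4 + 1) with ha5
  have l1 := le_findFree m 1
  have l2 := le_findFree m (a1 + 1)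
  have l3 := le_findFree m (a2 + 1)
  have l4 := le_findFree m (a3 + 1)
  have l5 := le_findFree m (a4 + 1)
  rw [← ha1] at l1; rw [← ha2] at l2; rw [← ha3] at l3; rw [← ha4] at l4; rw [← ha5] at l5
  set G := max F (a5 + 1) with hG
  have hFG : F ≤ G := le_max_left _ _
  have e1 := stepFilter m 1 G (by rw [← ha1]; omega)
  rw [← ha1] at e1
  have e2 := stepFilter m (a1 + 1) G (by rw [← ha2]; omega)
  rw [← ha2] at e2
  have e3 := stepFilter m (a2 + 1) G (by rw [← ha3]; omega)
  rw [← ha3] at e3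
  have e4 := stepFilter m (a3 + 1) G (by rw [← ha4]; omega)
  rw [← ha4] at e4
  have e5 := stepFilter m (a4 + 1) G (by rw [← ha5]; omega)
  rw [← ha5] at e5
  have hGchain : missBelow m G = a1 :: a2 :: a3 :: a4 :: a5 ::
      (PySem.List.pyRange (a5 + 1) G 1).filter (fun n => !decide (n ∈ m)) := by
    unfold missBelow
    rw [e1, e2, e3, e4, e5]
  have hsplit := missBelow_prefix m F G h1 hFG
  -- L is a length-5 prefix of missBelow m G
  have hpre : missBelow m G = L ++ (PySem.List.pyRange F G 1).filter (fun n => !decide (n ∈ m)) := by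
    rw [hsplit, hL]
  have : L = (missBelow m G).take 5 := by
    rw [hpre, ← hlen, List.take_left]
  rw [this, hGchain]
  simp

theorem valoresSuma_spec_aux (vectorM vectorS : List Int) :
    valoresSuma vectorM vectorS = valoresSuma_alt vectorM vectorS := by
  set m := vectorM with hm
  -- B side: run the invariant on the sorted distinct positives
  set vals := PySem.List.sorted (PySem.Set.ofList (m.filter (fun v => decide (0 < v)))) (fun x => x) with hvals
  have hsorted : vals.Pairwise (· < ·) := by
    rw [hvals]; exact PySem.List.sorted_ofList_pairwise_lt _
  have hmemvals : ∀ v, v ∈ vals ↔ (v ∈ m ∧ 0 < v) := by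
    intro v
    rw [hvals, PySem.List.mem_sorted, PySem.Set.mem_ofList, List.mem_filter]
    simp
  have hinv := foldBInv m vals [] 1 hsorted
    (fun v hv => ⟨((hmemvals v).mp hv).1, by have := ((hmemvals v).mp hv).2; omega⟩)
    (by omega) (by simp)
    ⟨1, by omega, by simp [missBelow, PySem.List.pyRange_one_eq_nil], by
      intro _
      exact ⟨rfl, fun x hx h0 h1 => (hmemvals x).mpr ⟨hx, h0⟩⟩⟩
  set st := vals.foldl
      (fun (st : List Int × Int) v =>
        if 5 ≤ st.1.length then st
        else (st.1 ++ PySem.List.pyRange st.2 (min v (st.2 + 5 - (st.1.length : Int))) 1, v + 1))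
      ([], 1) with hst
  obtain ⟨hlen, h1e, E, hE1, hEq, hlt⟩ := hinv
  -- the final fill step: res has exactly 5 elements and is missBelow at some bound
  have hres : ∃ F, 1 ≤ F ∧
      st.1 ++ PySem.List.pyRange st.2 (st.2 + 5 - (st.1.length : Int)) 1 = missBelow m F ∧
      (st.1 ++ PySem.List.pyRange st.2 (st.2 + 5 - (st.1.length : Int)) 1).length = 5 := by
    by_cases h5 : st.1.length = 5
    · refine ⟨E, hE1, ?_, ?_⟩
      · rw [PySem.List.pyRange_one_eq_nil (by omega), List.append_nil, hEq]
      · rw [PySem.List.pyRange_one_eq_nil (by omega), List.append_nil, h5]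
    · have hlen5 : st.1.length < 5 := by omega
      obtain ⟨hEe, hnone⟩ := hlt hlen5
      subst hEe
      have hL : ((missBelow m st.2).length : Int) = (st.1.length : Int) := by rw [hEq]
      refine ⟨st.2 + 5 - (st.1.length : Int), by omega, ?_, ?_⟩
      · rw [hEq, missBelow_prefix m st.2 (st.2 + 5 - ((missBelow m st.2).length : Int)) hE1
          (by rw [hL]; omega),
          filterRangeFree m _ _ (fun x hx1 _ hxm => hnone x hxm (by omega) hx1)]
      · rw [List.length_append, PySem.List.length_pyRange_one]
        omega
  obtain ⟨F, hF1, hFeq, hFlen⟩ := hres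
  have hchain := missBelow_eq_chain m F hF1 _ hFeq hFlen
  -- now reduce both sides to the explicit five values
  have hr : PySem.List.pyRange 0 5 1 = [0, 1, 2, 3, 4] := by decide
  simp only [valoresSuma, valoresSuma_alt, hr, List.foldl, ← hvals, ← hst]
  rw [hchain]
  simp [PySem.List.pyGetD_ofNat']

-- ===== VERDICT (by name: the statement is the Claim_ definition above) =====
theorem valoresSuma_spec : Claim_equal_valoresSuma := by
  intro vectorM vectorS _ _
  unfold Spec_valoresSuma
  exact valoresSuma_spec_aux vectorM vectorS
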